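-- pv_equiv track=rewrite | github.com/JesusTalMor/Intercalador_biblioteca | string_helper.py | revisar_pipeB
-- ===== SOURCE A (Python) =====
-- letras_array = ['A','B','C','D','E','F','G','H','I','J','K','L','M','N','O','P','Q','R','S','T','U','V','W','X','Y','Z']
--
-- def buscar_caracter(STR: str, char: str) -> int:
--   try: pos = STR.index(char)
--   except: pos = 0
--
--   return pos
--
-- def buscar_pipe(STR:str) -> int:
--   ''' Retorna la posición para partir PIPE A y PIPE B '''
--   lista_char = [(' .', 2), ('. ', 2), (' ', 1)]
--   pos = 0
--   for char, lenght in lista_char: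
--     pos = buscar_caracter(STR, char)
--     if pos != 0: return pos, lenght
--   return pos, 0
--
-- def revisar_pipeB(STR:str) -> bool:
--   ''' Revisa si tiene sentido el corte de pipe B'''
--   posicion_pipe, diferencia = buscar_pipe(STR)
--   nuevo_str = STR[::-1]
--   length = len(nuevo_str)
--
--   nuevo_posicion_corte = 0
--   for pos in range(length):
--     if nuevo_str[pos] in letras_array:
--       nuevo_posicion_corte = pos
--       break
--
--   nueva_posicion_pipe = length - 1 - (nuevo_posicion_corte + diferencia)
--   if posicion_pipe == nueva_posicion_pipe: return True
--   else: return False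
-- ===== SOURCE B (Python) =====
-- def revisar_pipeB(STR: str) -> bool:
--   ''' Chain of str.find calls instead of try/except loop; last-uppercase via index list. '''
--   p = STR.find(' .')
--   if p > 0:
--     diff = 2
--   else:
--     p = STR.find('. ')
--     if p > 0:
--       diff = 2
--     else:
--       p = STR.find(' ')
--       if p > 0:
--         diff = 1
--       else:
--         p, diff = 0, 0
--   ups = [i for i, ch in enumerate(STR) if 'A' <= ch <= 'Z']
--   last = ups[-1] if ups else len(STR) - 1
--   return p == last - diff
-- ===== Notes on version B (the rewrite author's own statement) =====
-- stated objective: simpler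
-- what changed: Drops the try/except buscar_caracter/buscar_pipe loop for a direct chain of str.find calls, and replaces the reverse-then-break scan for the first uppercase with a forward comprehension of uppercase indices (range test 'A' <= ch <= 'Z' instead of list membership) taking the last one.
import Mathlib
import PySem

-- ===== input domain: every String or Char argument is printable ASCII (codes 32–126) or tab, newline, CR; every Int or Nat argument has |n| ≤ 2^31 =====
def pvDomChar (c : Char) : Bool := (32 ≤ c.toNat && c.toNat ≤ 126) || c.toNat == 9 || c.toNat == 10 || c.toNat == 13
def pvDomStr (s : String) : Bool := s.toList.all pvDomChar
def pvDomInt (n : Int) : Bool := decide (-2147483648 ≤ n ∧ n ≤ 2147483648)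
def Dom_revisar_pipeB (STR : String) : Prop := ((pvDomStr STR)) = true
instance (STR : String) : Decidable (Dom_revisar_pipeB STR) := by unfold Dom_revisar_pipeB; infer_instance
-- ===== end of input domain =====

-- B replaces A's try/except buscar_pipe loop by a chain of str.find calls and A's
-- reverse-and-break uppercase scan by a forward index comprehension (objective: simpler).

-- ===== PORT A =====
def letras_array : List Char :=
  ['A','B','C','D','E','F','G','H','I','J','K','L','M',
   'N','O','P','Q','R','S','T','U','V','W','X','Y','Z']

-- try: pos = STR.index(char) / except: pos = 0  — index raises exactly where find = -1
def buscar_caracter (STR : String) (char : String) : Int :=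
  let pos := PySem.Str.find STR char
  if pos = -1 then 0 else pos

def buscar_pipe_loop (STR : String) : List (String × Int) → Int → Int × Int
  | [], pos => (pos, 0)
  | (char, lenght) :: rest, _ =>
      let pos := buscar_caracter STR char
      if pos ≠ 0 then (pos, lenght) else buscar_pipe_loop STR rest pos

def buscar_pipe (STR : String) : Int × Int :=
  buscar_pipe_loop STR [(" .", 2), (". ", 2), (" ", 1)] 0

-- for pos in range(length): if nuevo_str[pos] in letras_array: corte = pos; break  (default 0)
def corte_loop : List Char → Int → Int
  | [], _ => 0
  | c :: rest, pos => if letras_array.contains c then pos else corte_loop rest (pos + 1)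

def revisar_pipeB (STR : String) : Bool :=
  let pd := buscar_pipe STR
  let posicion_pipe := pd.1
  let diferencia := pd.2
  let nuevo_str := STR.toList.reverse          -- STR[::-1]
  let length : Int := nuevo_str.length
  let nuevo_posicion_corte := corte_loop nuevo_str 0
  let nueva_posicion_pipe := length - 1 - (nuevo_posicion_corte + diferencia)
  if posicion_pipe = nueva_posicion_pipe then true else false

-- ===== PORT B =====
-- chain of STR.find calls (p > 0 means "found at a nonzero position"), then
-- ups = [i for i, ch in enumerate(STR) if 'A' <= ch <= 'Z']; last = ups[-1] if ups else len-1
def revisar_pipeB_alt (STR : String) : Bool :=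
  let p1 := PySem.Str.find STR " ."
  let pd : Int × Int :=
    if p1 > 0 then (p1, 2)
    else
      let p2 := PySem.Str.find STR ". "
      if p2 > 0 then (p2, 2)
      else
        let p3 := PySem.Str.find STR " "
        if p3 > 0 then (p3, 1) else (0, 0)
  let ups : List Int :=
    ((PySem.List.enumerate STR.toList 0).filter
      (fun q => decide ('A' ≤ q.2) && decide (q.2 ≤ 'Z'))).map Prod.fst
  let last : Int :=
    match ups.getLast? with
    | some j => j
    | none => (STR.toList.length : Int) - 1
  pd.1 == last - pd.2

-- ===== PRECONDITION & SPEC =====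
def Spec_revisar_pipeB (STR : String) (out : Bool) : Prop := out = revisar_pipeB_alt STR
instance (STR : String) (out : Bool) : Decidable (Spec_revisar_pipeB STR out) := by unfold Spec_revisar_pipeB; infer_instance

-- ===== CLAIM =====
def Claim_equal_revisar_pipeB : Prop := ∀ (STR : String), Dom_revisar_pipeB STR → Spec_revisar_pipeB STR (revisar_pipeB STR)

-- ===== LEMMAS AND PROOFS =====

theorem char_le_iff (a b : Char) : a ≤ b ↔ a.toNat ≤ b.toNat := by
  rw [Char.le_def, UInt32.le_iff_toNat_le]; rfl

theorem char_eq_iff (a b : Char) : a = b ↔ a.toNat = b.toNat := by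
  constructor
  · rintro rfl; rfl
  · intro h; apply Char.ext; apply UInt32.toNat_inj.mp; exact h

theorem mem_letras (c : Char) :
    letras_array.contains c = (decide ('A' ≤ c) && decide (c ≤ 'Z')) := by
  have h : ∀ d : Char, (c == d) = (c.toNat == d.toNat) := by
    intro d; simp [char_eq_iff]
  simp only [letras_array, List.contains_cons, List.contains_nil, h, Bool.or_false]
  simp only [char_le_iff]
  have hA : ('A').toNat = 65 := rfl
  have hZ : ('Z').toNat = 90 := rfl
  rw [hA, hZ]
  by_cases hlo : 65 ≤ c.toNat
  · by_cases hhi : c.toNat ≤ 90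
    · interval_cases h : c.toNat <;> simp_all
    · have : ∀ k : Nat, k ≤ 90 → (c.toNat == k) = false := by
        intro k hk; simp; omega
      simp [this, hlo, hhi]
  · have : ∀ k : Nat, 65 ≤ k → (c.toNat == k) = false := by
      intro k hk; simp; omega
    simp [this, hlo]

theorem guard_eq (STR char : String) :
    buscar_caracter STR char =
      if PySem.Str.find STR char > 0 then PySem.Str.find STR char else 0 := by
  have h : -1 ≤ PySem.Str.find STR char := by
    simpa using PySem.Chars.neg_one_le_find STR.toList char.toList
  simp only [buscar_caracter]
  split_ifs <;> omega

-- A's guarded-index chain equals B's find chain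
theorem pipe_eq (STR : String) :
    buscar_pipe STR =
      (if PySem.Str.find STR " ." > 0 then (PySem.Str.find STR " .", 2)
       else if PySem.Str.find STR ". " > 0 then (PySem.Str.find STR ". ", 2)
       else if PySem.Str.find STR " " > 0 then (PySem.Str.find STR " ", 1)
       else (0, 0)) := by
  simp only [buscar_pipe, buscar_pipe_loop, guard_eq]
  split_ifs <;> simp_all

-- index of the first uppercase letter, if any
def firstU? : List Char → Option Nat
  | [] => none
  | c :: t => if letras_array.contains c then some 0 else (firstU? t).map (· + 1)

-- index of the last uppercase letter, if any
def lastU? : List Char → Option Nat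
  | [] => none
  | c :: t =>
      match lastU? t with
      | some j => some (j + 1)
      | none => if letras_array.contains c then some 0 else none

theorem lastU?_lt {l : List Char} {j : Nat} (h : lastU? l = some j) : j < l.length := by
  induction l generalizing j with
  | nil => simp [lastU?] at h
  | cons c t ih =>
      simp only [lastU?] at h
      cases ht : lastU? t with
      | some k => rw [ht] at h; simp at h; subst h; simpa using Nat.succ_lt_succ (ih ht)
      | none =>
          rw [ht] at h
          by_cases hc : c ∈ letras_array
          · simp [hc] at h; subst h; simp
          · simp [hc] at h

theorem corte_loop_eq (l : List Char) (pos : Int) :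
    corte_loop l pos = match firstU? l with | some i => pos + (i : Int) | none => 0 := by
  induction l generalizing pos with
  | nil => simp [corte_loop, firstU?]
  | cons c t ih =>
      by_cases hc : c ∈ letras_array
      · simp [corte_loop, firstU?, hc]
      · simp only [corte_loop, firstU?, List.elem_eq_contains.symm, hc, List.elem_eq_mem,
          decide_eq_true_eq]
        rw [ih]
        cases ht : firstU? t with
        | some i => simp; ring
        | none => simp

theorem ups_getLast (l : List Char) (s : Int) :
    (((PySem.List.enumerate l s).filter
        (fun q => decide ('A' ≤ q.2) && decide (q.2 ≤ 'Z'))).map Prod.fst).getLast?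
      = (lastU? l).map (fun j => s + (j : Int)) := by
  induction l generalizing s with
  | nil => simp [PySem.List.enumerate_nil, lastU?]
  | cons c t ih =>
      rw [PySem.List.enumerate_cons, List.filter_cons]
      by_cases hc : letras_array.contains c = true
      · rw [if_pos (by rw [← mem_letras]; exact hc)]
        rw [List.map_cons]
        rw [List.getLast?_cons]
        rw [ih]
        cases ht : lastU? t with
        | some j => simp [lastU?, ht]; ring
        | none =>
            have hm : c ∈ letras_array := by simpa using hc
            simp [lastU?, ht, hm]
      · rw [if_neg (by rw [← mem_letras]; simpa using hc)]
        rw [ih]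
        cases ht : lastU? t with
        | some j => simp [lastU?, ht]; ring
        | none =>
            have hm : c ∉ letras_array := by simpa using hc
            simp [lastU?, ht, hm]

theorem firstU?_reverse (l : List Char) :
    firstU? l.reverse = (lastU? l).map (fun j => l.length - 1 - j) := by
  induction l with
  | nil => simp [firstU?, lastU?]
  | cons c t ih =>
      rw [List.reverse_cons]
      have happ : ∀ (xs : List Char),
          firstU? (xs ++ [c]) =
            match firstU? xs with
            | some i => some i
            | none => if letras_array.contains c then some xs.length else none := by
        intro xs
        induction xs with
        | nil => by_cases hc : c ∈ letras_array <;> simp [firstU?, hc]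
        | cons d ds ihd =>
            by_cases hd : d ∈ letras_array
            · simp [firstU?, hd]
            · simp only [List.cons_append, firstU?]
              rw [if_neg (by simpa using hd), if_neg (by simpa using hd)]
              rw [ihd]
              cases hds : firstU? ds with
              | some i => simp
              | none =>
                  by_cases hc : c ∈ letras_array <;> simp [hc]
      rw [happ, ih]
      cases ht : lastU? t with
      | some j =>
          have hj := lastU?_lt ht
          simp [lastU?, ht]
          omega
      | none =>
          by_cases hc : c ∈ letras_array <;> simp [lastU?, ht, hc]

theorem main_eq (STR : String) : revisar_pipeB STR = revisar_pipeB_alt STR := by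
  simp only [revisar_pipeB, revisar_pipeB_alt]
  rw [← pipe_eq]
  simp only [corte_loop_eq, firstU?_reverse, List.length_reverse, ups_getLast]
  cases ht : lastU? STR.toList with
  | some j =>
      have hj := lastU?_lt ht
      simp only [Option.map_some]
      have hXY : (STR.toList.length : Int) - 1
            - (0 + ((STR.toList.length - 1 - j : Nat) : Int) + (buscar_pipe STR).2)
          = 0 + (j : Int) - (buscar_pipe STR).2 := by omega
      simp only [hXY]
      by_cases hp : (buscar_pipe STR).1 = 0 + (j : Int) - (buscar_pipe STR).2 <;>
        simp [hp, Bool.beq_eq_decide_eq]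
  | none =>
      simp only [Option.map_none]
      by_cases hp : (buscar_pipe STR).1
          = (STR.toList.length : Int) - 1 - (0 + (buscar_pipe STR).2) <;>
        by_cases hq : (buscar_pipe STR).1
          = (STR.toList.length : Int) - 1 - (buscar_pipe STR).2 <;>
        simp [hp, hq, Bool.beq_eq_decide_eq]

-- ===== VERDICT =====
theorem revisar_pipeB_spec : Claim_equal_revisar_pipeB := by
  intro STR _
  unfold Spec_revisar_pipeB
  exact main_eq STR
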